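-- pv_equiv track=rewrite | github.com/uuuuj/Jungle-Algorithm-Study | week-24/sangwoo/programmers_86971.py | bfs
-- ===== SOURCE A (Python) =====
-- from collections import deque
--
-- def bfs(graph, visited, x, count):
--     q = deque([x])
--
--     while q:
--         idx = q.popleft()
--
--         # 현재 노드와 연결된 모든 노드 탐색
--         for i in graph[idx]:
--             if visited[i] == False:
--                 visited[i] = True  # 방문 처리
--                 q.append(i)
--                 count += 1         # 연결된 송전탑 개수 증가
--
--     return count
-- ===== SOURCE B (Python) =====
-- def bfs(graph, visited, x, count):
--     # Level-synchronized BFS: process the whole frontier, collecting the next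
--     # level in a plain list; no deque needed. Mutates visited like the original.
--     frontier = [x]
--     while frontier:
--         nxt = []
--         for idx in frontier:
--             for i in graph[idx]:
--                 if visited[i] == False:
--                     visited[i] = True
--                     nxt.append(i)
--                     count += 1
--         frontier = nxt
--     return count
-- ===== Notes on version B (the rewrite author's own statement) =====
-- stated objective: alternative
-- what changed: Replaces the deque-driven node-at-a-time BFS loop by a level-synchronized (frontier) BFS: each iteration scans the whole current level and collects the next level in a plain list, so no deque is needed; the sequence of visits, counts and raised exceptions is identical.
-- outside the precondition, e.g. on bfs([[], [5]], [False], 0, 0): A returns 0, B returns 0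
import Mathlib
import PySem

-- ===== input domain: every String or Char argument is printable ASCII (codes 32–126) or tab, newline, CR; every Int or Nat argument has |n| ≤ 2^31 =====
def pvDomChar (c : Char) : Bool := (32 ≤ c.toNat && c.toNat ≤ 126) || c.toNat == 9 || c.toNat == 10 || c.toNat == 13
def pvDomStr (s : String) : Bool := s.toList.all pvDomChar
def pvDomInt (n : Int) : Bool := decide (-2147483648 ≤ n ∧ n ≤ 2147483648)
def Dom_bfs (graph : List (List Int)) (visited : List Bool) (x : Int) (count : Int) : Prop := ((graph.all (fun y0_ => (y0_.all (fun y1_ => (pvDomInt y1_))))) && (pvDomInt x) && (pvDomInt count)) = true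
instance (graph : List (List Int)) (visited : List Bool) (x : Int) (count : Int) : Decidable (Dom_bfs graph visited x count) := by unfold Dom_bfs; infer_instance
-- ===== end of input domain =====

-- B replaces A's deque-based BFS by a level-synchronized (frontier) BFS — a different
-- decomposition of the same traversal, no deque; same cost, claimed as 'alternative'.
-- Both Pythons mutate `visited` identically in place; the equivalence proved here is about
-- the RETURN value (the Lean ports thread `visited` functionally).

-- number of still-unvisited entries: the termination measure of both loops
def pvCntF (v : List Bool) : Nat := v.count false

-- if visited[i] reads `false`, the Python index resolves to a plain Nat position
lemma pv_resolve (v : List Bool) (i : Int) (b : Bool)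
    (h : PySem.List.pyGet? v i = some b) :
    ∃ k : Nat, v[k]? = some b ∧ PySem.List.pySetD v i true = v.set k true := by
  unfold PySem.List.pyGet? at h
  cases hk : PySem.List.pyIdx? v.length i with
  | none => rw [hk] at h; simp at h
  | some k =>
    rw [hk] at h
    exact ⟨k, h, by simp [PySem.List.pySetD, PySem.List.pySet?, hk]⟩

lemma pv_count_set (v : List Bool) (k : Nat) (h : v[k]? = some false) :
    pvCntF (v.set k true) + 1 = pvCntF v := by
  induction v generalizing k with
  | nil => simp at h
  | cons a t ih =>
    cases k with
    | zero =>
      simp at h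
      simp [pvCntF, h]
    | succ k =>
      simp at h
      have := ih k h
      simp [pvCntF, List.count_cons] at this ⊢
      omega

-- ===== PORT A =====
-- inner `for i in graph[idx]`-loop of A: appends fresh neighbours to the queue
-- (an out-of-range visited[i] is an IndexError in Python; excluded by Pre_, skipped here)
def pvScanA : List Int → List Bool → List Int → Int → List Bool × List Int × Int
  | [], v, q, c => (v, q, c)
  | i :: rest, v, q, c =>
    match PySem.List.pyGet? v i with
    | some false => pvScanA rest (PySem.List.pySetD v i true) (q ++ [i]) (c + 1)
    | _ => pvScanA rest v q c

-- measure fact the outer while-loop's termination needs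
lemma pvScanA_meas (row : List Int) : ∀ (v : List Bool) (q : List Int) (c : Int),
    pvCntF (pvScanA row v q c).1 + (pvScanA row v q c).2.1.length = pvCntF v + q.length ∧
    q.length ≤ (pvScanA row v q c).2.1.length := by
  induction row with
  | nil => intro v q c; simp [pvScanA]
  | cons i rest ih =>
    intro v q c
    cases h : PySem.List.pyGet? v i with
    | none => simpa [pvScanA, h] using ih v q c
    | some b =>
      cases b with
      | true => simpa [pvScanA, h] using ih v q c
      | false =>
        obtain ⟨k, hk, hset⟩ := pv_resolve v i false h
        have hc := pv_count_set v k hk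
        have hrec := ih (PySem.List.pySetD v i true) (q ++ [i]) (c + 1)
        simp only [pvScanA, h]
        simp only [List.length_append, List.length_cons, List.length_nil] at hrec ⊢
        rw [hset] at hrec ⊢
        omega

-- the while-loop of A: pop the front of the queue, scan its row, repeat
def pvBfsLoop (graph : List (List Int)) (q : List Int) (v : List Bool) (c : Int) : Int :=
  match q with
  | [] => c
  | idx :: rest =>
    match PySem.List.pyGet? graph idx with
    | none => c          -- graph[idx] raises IndexError in Python (outside Pre_)
    | some row =>
      match hA : pvScanA row v rest c with
      | (v', q', c') => pvBfsLoop graph q' v' c'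
termination_by (pvCntF v, q.length)
decreasing_by
  have h := pvScanA_meas row v rest c
  rw [hA] at h
  simp only [List.length_cons] at *
  rcases Nat.lt_or_ge (pvCntF v') (pvCntF v) with hlt | hge
  · exact Prod.Lex.left _ _ hlt
  · have he : pvCntF v' = pvCntF v := by omega
    rw [he]
    exact Prod.Lex.right _ (by omega)

def bfs (graph : List (List Int)) (visited : List Bool) (x : Int) (count : Int) : Int :=
  pvBfsLoop graph [x] visited count

-- ===== PORT B =====
-- innermost `for i in graph[idx]`-loop of B: appends fresh neighbours to the NEXT level
def pvScanB : List Int → List Bool → List Int → Int → List Bool × List Int × Int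
  | [], v, nxt, c => (v, nxt, c)
  | i :: rest, v, nxt, c =>
    match PySem.List.pyGet? v i with
    | some false => pvScanB rest (PySem.List.pySetD v i true) (nxt ++ [i]) (c + 1)
    | _ => pvScanB rest v nxt c

lemma pvScanB_meas (row : List Int) : ∀ (v : List Bool) (nxt : List Int) (c : Int),
    pvCntF (pvScanB row v nxt c).1 + (pvScanB row v nxt c).2.1.length = pvCntF v + nxt.length ∧
    nxt.length ≤ (pvScanB row v nxt c).2.1.length := by
  induction row with
  | nil => intro v nxt c; simp [pvScanB]
  | cons i rest ih =>
    intro v nxt c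
    cases h : PySem.List.pyGet? v i with
    | none => simpa [pvScanB, h] using ih v nxt c
    | some b =>
      cases b with
      | true => simpa [pvScanB, h] using ih v nxt c
      | false =>
        obtain ⟨k, hk, hset⟩ := pv_resolve v i false h
        have hc := pv_count_set v k hk
        have hrec := ih (PySem.List.pySetD v i true) (nxt ++ [i]) (c + 1)
        simp only [pvScanB, h]
        simp only [List.length_append, List.length_cons, List.length_nil] at hrec ⊢
        rw [hset] at hrec ⊢
        omega

-- `for idx in frontier`-loop of B: scan every row of the current level
def pvFrontier (graph : List (List Int)) : List Int → List Bool → List Int → Int → List Bool × List Int × Int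
  | [], v, nxt, c => (v, nxt, c)
  | idx :: rest, v, nxt, c =>
    match PySem.List.pyGet? graph idx with
    | none => (v, nxt, c)     -- graph[idx] raises IndexError in Python (outside Pre_)
    | some row =>
      match pvScanB row v nxt c with
      | (v', nxt', c') => pvFrontier graph rest v' nxt' c'

lemma pvFrontier_meas (graph : List (List Int)) (f : List Int) :
    ∀ (v : List Bool) (nxt : List Int) (c : Int),
    pvCntF (pvFrontier graph f v nxt c).1 + (pvFrontier graph f v nxt c).2.1.length
      = pvCntF v + nxt.length ∧
    nxt.length ≤ (pvFrontier graph f v nxt c).2.1.length := by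
  induction f with
  | nil => intro v nxt c; simp [pvFrontier]
  | cons idx rest ih =>
    intro v nxt c
    cases h : PySem.List.pyGet? graph idx with
    | none => simp [pvFrontier, h]
    | some row =>
      have hs := pvScanB_meas row v nxt c
      cases hB : pvScanB row v nxt c with
      | mk v' r =>
        cases r with
        | mk nxt' c' =>
          have hrec := ih v' nxt' c'
          rw [hB] at hs
          simp only at hs
          simp [pvFrontier, h, hB]
          omega

-- the while-loop of B: process a whole level, recurse on the collected next level
def pvBfsAltLoop (graph : List (List Int)) (f : List Int) (v : List Bool) (c : Int) : Int :=
  match f with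
  | [] => c
  | _ :: _ =>
    match hF : pvFrontier graph f v [] c with
    | (v', nxt, c') => pvBfsAltLoop graph nxt v' c'
termination_by (pvCntF v, f.length)
decreasing_by
  have h := pvFrontier_meas graph f v [] c
  rw [hF] at h
  simp only [List.length_nil] at h
  rcases Nat.lt_or_ge (pvCntF v') (pvCntF v) with hlt | hge
  · exact Prod.Lex.left _ _ hlt
  · have he : pvCntF v' = pvCntF v := by omega
    rw [he]
    exact Prod.Lex.right _ (by simp; omega)

def bfs_alt (graph : List (List Int)) (visited : List Bool) (x : Int) (count : Int) : Int :=
  pvBfsAltLoop graph [x] visited count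

-- ===== PRECONDITION & SPEC =====
-- Pre_ = no IndexError: the start node and every listed neighbour are valid Python indices
-- into graph and visited. This is slightly narrower than A's exact raise-free set (A only
-- raises when an invalid index is actually REACHED; indices in unreached rows are also
-- required valid here, because reachability is not a closed-form condition).
def Pre_bfs (graph : List (List Int)) (visited : List Bool) (x : Int) (count : Int) : Prop :=
  PySem.Raise.InRange graph.length x ∧
  ∀ row ∈ graph, ∀ i ∈ row,
    PySem.Raise.InRange graph.length i ∧ PySem.Raise.InRange visited.length i

instance (graph : List (List Int)) (visited : List Bool) (x : Int) (count : Int) : Decidable (Pre_bfs graph visited x count) := by unfold Pre_bfs; infer_instance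

def pvWitness_bfs : List (List Int) × List Bool × Int × Int := ([[1], [0, 1]], [false, false], 0, 0)

def Spec_bfs (graph : List (List Int)) (visited : List Bool) (x : Int) (count : Int) (out : Int) : Prop := out = bfs_alt graph visited x count
instance (graph : List (List Int)) (visited : List Bool) (x : Int) (count : Int) (out : Int) : Decidable (Spec_bfs graph visited x count out) := by unfold Spec_bfs; infer_instance

-- ===== CLAIM (what is proved, stated in full; the proofs are below) =====
def Claim_equal_bfs : Prop := ∀ (graph : List (List Int)) (visited : List Bool) (x : Int) (count : Int), Dom_bfs graph visited x count → Pre_bfs graph visited x count → Spec_bfs graph visited x count (bfs graph visited x count)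

-- ===== LEMMAS AND PROOFS =====

-- canonical form of one row-scan: the freshly marked neighbours, separated out
def pvScanC : List Int → List Bool → Int → List Bool × List Int × Int
  | [], v, c => (v, [], c)
  | i :: rest, v, c =>
    match PySem.List.pyGet? v i with
    | some false =>
      match pvScanC rest (PySem.List.pySetD v i true) (c + 1) with
      | (v', ch, c') => (v', i :: ch, c')
    | _ => pvScanC rest v c

lemma pvScanA_eq (row : List Int) : ∀ (v : List Bool) (q : List Int) (c : Int),
    pvScanA row v q c
      = ((pvScanC row v c).1, q ++ (pvScanC row v c).2.1, (pvScanC row v c).2.2) := by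
  induction row with
  | nil => intro v q c; simp [pvScanA, pvScanC]
  | cons i rest ih =>
    intro v q c
    cases h : PySem.List.pyGet? v i with
    | none => simp [pvScanA, pvScanC, h, ih]
    | some b =>
      cases b with
      | true => simp [pvScanA, pvScanC, h, ih]
      | false =>
        cases hC : pvScanC rest (PySem.List.pySetD v i true) (c + 1) with
        | mk v' r =>
          cases r with
          | mk ch c' => simp [pvScanA, pvScanC, h, ih, hC]

lemma pvScanB_eq (row : List Int) : ∀ (v : List Bool) (nxt : List Int) (c : Int),
    pvScanB row v nxt c
      = ((pvScanC row v c).1, nxt ++ (pvScanC row v c).2.1, (pvScanC row v c).2.2) := by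
  induction row with
  | nil => intro v nxt c; simp [pvScanB, pvScanC]
  | cons i rest ih =>
    intro v nxt c
    cases h : PySem.List.pyGet? v i with
    | none => simp [pvScanB, pvScanC, h, ih]
    | some b =>
      cases b with
      | true => simp [pvScanB, pvScanC, h, ih]
      | false =>
        cases hC : pvScanC rest (PySem.List.pySetD v i true) (c + 1) with
        | mk v' r =>
          cases r with
          | mk ch c' => simp [pvScanB, pvScanC, h, ih, hC]

lemma pvScanC_meas (row : List Int) : ∀ (v : List Bool) (c : Int),
    pvCntF (pvScanC row v c).1 + (pvScanC row v c).2.1.length = pvCntF v := by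
  intro v c
  have := pvScanA_meas row v [] c
  rw [pvScanA_eq] at this
  simpa using this.1

lemma pvScanC_mem (row : List Int) : ∀ (v : List Bool) (c : Int),
    ∀ i ∈ (pvScanC row v c).2.1, i ∈ row := by
  induction row with
  | nil => intro v c; simp [pvScanC]
  | cons i rest ih =>
    intro v c j hj
    cases h : PySem.List.pyGet? v i with
    | none =>
      rw [pvScanC, h] at hj
      exact List.mem_cons_of_mem _ (ih v c j hj)
    | some b =>
      cases b with
      | true =>
        rw [pvScanC, h] at hj
        exact List.mem_cons_of_mem _ (ih v c j hj)
      | false =>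
        rw [pvScanC, h] at hj
        cases hC : pvScanC rest (PySem.List.pySetD v i true) (c + 1) with
        | mk v' r =>
          cases r with
          | mk ch c' =>
            rw [hC] at hj
            simp at hj
            rcases hj with rfl | hj
            · exact List.mem_cons_self
            · exact List.mem_cons_of_mem _ (ih _ _ j (by rw [hC]; exact hj))

lemma pv_inRange_get (graph : List (List Int)) (idx : Int)
    (h : PySem.Raise.InRange graph.length idx) :
    ∃ row, PySem.List.pyGet? graph idx = some row := by
  cases hg : PySem.List.pyGet? graph idx with
  | none => exact absurd h ((PySem.List.pyGet?_eq_none_iff _ _).mp hg)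
  | some row => exact ⟨row, rfl⟩

-- KEY LEMMA: A's queue state (f ++ n) corresponds to B mid-frontier: remaining
-- frontier f, already-collected next level n.  Induction on
-- (#unvisited, |f| + |n|, |n|), lexicographically.
theorem pvKey (graph : List (List Int))
    (HG : ∀ row ∈ graph, ∀ i ∈ row, PySem.Raise.InRange graph.length i)
    (f n : List Int) (v : List Bool) (c : Int)
    (hq : ∀ i ∈ f ++ n, PySem.Raise.InRange graph.length i) :
    pvBfsLoop graph (f ++ n) v c =
      (fun r => pvBfsAltLoop graph r.2.1 r.1 r.2.2) (pvFrontier graph f v n c) := by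
  match f with
  | [] =>
    simp only [pvFrontier, List.nil_append]
    match n with
    | [] => simp [pvBfsLoop, pvBfsAltLoop]
    | m :: ms =>
      have hrec := pvKey graph HG (m :: ms) [] v c (by simpa using hq)
      rw [List.append_nil] at hrec
      rw [hrec]
      rw [pvBfsAltLoop]
  | idx :: rest =>
    have hidx : PySem.Raise.InRange graph.length idx := hq idx (by simp)
    obtain ⟨row, hrow⟩ := pv_inRange_get graph idx hidx
    have hrowmem : row ∈ graph := by
      apply PySem.List.mem_of_pyGet?_eq_some
      exact hrow
    rw [List.cons_append]
    simp only [pvBfsLoop, pvFrontier, hrow]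
    rw [pvScanA_eq, pvScanB_eq]
    cases hC : pvScanC row v c with
    | mk v₁ r =>
      cases r with
      | mk ch c₁ =>
        simp only
        have hmem : ∀ i ∈ rest ++ (n ++ ch), PySem.Raise.InRange graph.length i := by
          intro i hi
          rcases List.mem_append.mp hi with hi | hi
          · exact hq i (by simp [hi])
          · rcases List.mem_append.mp hi with hi | hi
            · exact hq i (by simp [hi])
            · have : i ∈ row := by
                have := pvScanC_mem row v c i (by rw [hC]; exact hi)
                exact this
              exact HG row hrowmem i this
        have hrec := pvKey graph HG rest (n ++ ch) v₁ c₁ hmem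
        rw [← List.append_assoc] at hrec
        rw [List.append_assoc (rest) n ch] at hrec
        calc pvBfsLoop graph (rest ++ n ++ ch) v₁ c₁
            = pvBfsLoop graph (rest ++ (n ++ ch)) v₁ c₁ := by rw [List.append_assoc]
          _ = _ := hrec
termination_by (pvCntF v, f.length + n.length, n.length)
decreasing_by
  · -- f = [], n = m :: ms ≠ [] : third component drops to 0
    simp [Prod.lex_iff]
  · -- f = idx :: rest : either some node got marked, or the total length drops
    have h := pvScanC_meas row v c
    rw [hC] at h
    simp only at h
    simp [Prod.lex_iff]
    omega

-- ===== VERDICT (by name: the statement is the Claim_ definition above) =====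
theorem bfs_spec : Claim_equal_bfs := by
  intro graph visited x count _ hpre
  unfold Spec_bfs bfs bfs_alt
  obtain ⟨hx, HGall⟩ := hpre
  have HG : ∀ row ∈ graph, ∀ i ∈ row, PySem.Raise.InRange graph.length i :=
    fun row hr i hi => (HGall row hr i hi).1
  have hkey := pvKey graph HG [x] [] visited count (by simpa using hx)
  rw [List.append_nil] at hkey
  rw [hkey]
  rw [pvBfsAltLoop]
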